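-- pv_equiv track=rewrite | github.com/asaenz16/URSA23 | Summer 24 Code/combine/GapProb.py | gap_subCv2
-- ===== SOURCE A (Python) =====
-- def gap_subCv2(j, k, Config):
--     sC = []
--     N= len(Config)
--     gap = True
--     for n in range(N):
--         gap = True
--         if j in Config[n]:
--             for x in range(j+1, k):
--                 gap = gap and not x in Config[n]
--         else:
--             gap = False
--         if gap:
--             sC.append(n)
--     return sC
-- ===== SOURCE B (Python) =====
-- def gap_subCv2(j, k, Config):
--     has_j = {n for n, c in enumerate(Config) if j in c}
--     blocked = {n for n, c in enumerate(Config) for x in c if j < x < k}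
--     return sorted(has_j - blocked)
-- ===== Notes on version B (the rewrite author's own statement) =====
-- stated objective: alternative
-- what changed: Instead of per-config scanning every integer in range(j+1, k) with a boolean gap flag and appending indices, B builds two index sets in separate passes (configs containing j; configs containing some element strictly between j and k, classified from the config's own elements) and returns the sorted set difference.
import Mathlib
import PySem

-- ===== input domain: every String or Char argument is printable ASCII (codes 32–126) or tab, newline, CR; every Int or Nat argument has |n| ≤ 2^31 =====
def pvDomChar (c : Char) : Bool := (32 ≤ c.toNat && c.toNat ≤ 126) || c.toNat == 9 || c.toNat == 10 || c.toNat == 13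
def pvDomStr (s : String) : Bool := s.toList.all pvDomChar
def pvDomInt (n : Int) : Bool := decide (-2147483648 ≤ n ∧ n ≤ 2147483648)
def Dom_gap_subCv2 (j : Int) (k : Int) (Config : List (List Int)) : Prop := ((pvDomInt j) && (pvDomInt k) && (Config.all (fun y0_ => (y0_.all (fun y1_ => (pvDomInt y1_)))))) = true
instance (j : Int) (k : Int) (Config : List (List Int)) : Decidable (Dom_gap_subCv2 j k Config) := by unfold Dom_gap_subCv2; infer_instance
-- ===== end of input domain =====

-- B replaces A's per-config gap-flag scan of every integer in the interval (j, k) by two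
-- index-set comprehensions over each config's own elements and a sorted set difference.

-- ===== PORT A =====
-- literal transliteration of A: for n in range(N), gap-flag loop over range(j+1, k)
def gap_subCv2 (j : Int) (k : Int) (Config : List (List Int)) : List Int :=
  (PySem.List.pyRange 0 (Config.length : Int) 1).foldl
    (fun sC n =>
      let c := PySem.List.pyGetD Config n []
      let gap :=
        if c.contains j then
          (PySem.List.pyRange (j + 1) k 1).foldl (fun g x => g && !(c.contains x)) true
        else false
      if gap then sC ++ [n] else sC) []

-- ===== PORT B =====
-- literal transliteration of B: two index sets via comprehensions, then sorted set difference
def gap_subCv2_alt (j : Int) (k : Int) (Config : List (List Int)) : List Int :=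
  let en := PySem.List.enumerate Config 0
  let hasJ : PySem.Set Int :=
    PySem.Set.ofList (((en.filter (fun p => p.2.contains j)).map (fun p => p.1)))
  let blocked : PySem.Set Int :=
    PySem.Set.ofList (en.flatMap (fun p =>
      (p.2.filter (fun x => decide (j < x) && decide (x < k))).map (fun _ => p.1)))
  PySem.List.sorted (PySem.Set.diff hasJ blocked) (fun x => x) false

-- ===== PRECONDITION & SPEC =====
def Spec_gap_subCv2 (j : Int) (k : Int) (Config : List (List Int)) (out : List Int) : Prop := out = gap_subCv2_alt j k Config
instance (j : Int) (k : Int) (Config : List (List Int)) (out : List Int) : Decidable (Spec_gap_subCv2 j k Config out) := by unfold Spec_gap_subCv2; infer_instance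

-- ===== CLAIM (what is proved, stated in full; the proofs are below) =====
def Claim_equal_gap_subCv2 : Prop := ∀ (j : Int) (k : Int) (Config : List (List Int)), Dom_gap_subCv2 j k Config → Spec_gap_subCv2 j k Config (gap_subCv2 j k Config)

-- ===== LEMMAS AND PROOFS =====

-- A's inner gap loop is an 'all' over the interval
theorem pv_foldl_and (l : List Int) (f : Int → Bool) (b : Bool) :
    l.foldl (fun g x => g && f x) b = (b && l.all f) := by
  induction l generalizing b with
  | nil => simp
  | cons x xs ih => simp [List.foldl_cons, ih, Bool.and_assoc]

-- the interval test over range(j+1,k) equals the element test over c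
theorem pv_interval (j k : Int) (c : List Int) :
    (PySem.List.pyRange (j + 1) k 1).all (fun x => !(c.contains x))
      = !(c.any (fun x => decide (j < x) && decide (x < k))) := by
  apply Bool.eq_iff_iff.mpr
  simp only [List.all_eq_true, Bool.not_eq_true', List.any_eq_false,
    PySem.List.mem_pyRange_one, List.contains_eq_mem, decide_eq_false_iff_not]
  constructor
  · intro h y hy
    by_cases h1 : j < y
    · by_cases h2 : y < k
      · exact absurd hy (h y ⟨by omega, h2⟩)
      · simp [h2]
    · simp [h1]
  · intro h x hx hmem
    have hh := h x hmem
    simp only [Bool.and_eq_true, decide_eq_true_eq, not_and] at hh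
    omega

-- combined per-config predicate
def pvGood (j k : Int) (p : Int × List Int) : Bool :=
  p.2.contains j && !(p.2.any (fun x => decide (j < x) && decide (x < k)))

-- A computes the ascending list of good indices
theorem pv_A_eq (j k : Int) (Config : List (List Int)) :
    gap_subCv2 j k Config
      = ((PySem.List.enumerate Config 0).filter (pvGood j k)).map (fun p => p.1) := by
  unfold gap_subCv2
  have hrange : PySem.List.pyRange 0 (Config.length : Int) 1
      = (PySem.List.enumerate Config 0).map (fun p => p.1) := by
    rw [PySem.List.map_fst_enumerate]; norm_num
  rw [hrange, List.foldl_map]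
  have hcongr : ∀ (acc : List Int) (p : Int × List Int), p ∈ PySem.List.enumerate Config 0 →
      (fun (sC : List Int) n =>
        let c := PySem.List.pyGetD Config n []
        let gap :=
          if c.contains j then
            (PySem.List.pyRange (j + 1) k 1).foldl (fun g x => g && !(c.contains x)) true
          else false
        if gap then sC ++ [n] else sC) acc p.1
      = (fun (sC : List Int) (p : Int × List Int) =>
          if pvGood j k p then sC ++ [p.1] else sC) acc p := by
    intro acc p hp
    rcases (PySem.List.mem_enumerate_iff _ _ _).1 hp with ⟨m, hm, rfl⟩
    simp only
    have hget : PySem.List.pyGetD Config ((0 : Int) + m) [] = Config[m] := by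
      simp [List.getD, hm]
    rw [hget, pv_foldl_and, pv_interval]
    by_cases hc : Config[m].contains j <;> simp [pvGood]
  rw [PySem.List.foldl_congr_mem _ _ _ _ hcongr, PySem.List.foldl_append_if]
  simp

-- B's set difference has exactly the good indices as members
theorem pv_mem_diff (j k : Int) (Config : List (List Int)) (x : Int) :
    (x ∈ PySem.Set.diff
        (PySem.Set.ofList (((PySem.List.enumerate Config 0).filter
            (fun p => p.2.contains j)).map (fun p => p.1)))
        (PySem.Set.ofList ((PySem.List.enumerate Config 0).flatMap (fun p =>
            (p.2.filter (fun y => decide (j < y) && decide (y < k))).map (fun _ => p.1)))))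
      ↔ x ∈ ((PySem.List.enumerate Config 0).filter (pvGood j k)).map (fun p => p.1) := by
  rw [PySem.Set.mem_diff]
  simp only [PySem.Set.mem_ofList, List.mem_map, List.mem_filter, List.mem_flatMap,
    PySem.List.mem_enumerate_iff, pvGood]
  constructor
  · rintro ⟨⟨a, ⟨⟨m, hm, rfl⟩, hj⟩, hx⟩, hnb⟩
    refine ⟨(0 + (m : Int), Config[m]), ⟨⟨m, hm, rfl⟩, ?_⟩, hx⟩
    simp only [Bool.and_eq_true, hj, true_and, Bool.not_eq_true', List.any_eq_false]
    intro y hy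
    by_cases hyk : j < y ∧ y < k
    · exact absurd ⟨_, ⟨m, hm, rfl⟩, y, ⟨hy, by simp [hyk.1, hyk.2]⟩, hx⟩ hnb
    · rcases not_and_or.1 hyk with h | h <;> simp [h]
  · rintro ⟨a, ⟨⟨m, hm, rfl⟩, hg⟩, hx⟩
    simp only [Bool.and_eq_true, Bool.not_eq_true', List.any_eq_false] at hg
    refine ⟨⟨_, ⟨⟨m, hm, rfl⟩, hg.1⟩, hx⟩, ?_⟩
    rintro ⟨a, ⟨m', hm', rfl⟩, y, ⟨hy, hyt⟩, hx'⟩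
    simp only at hx hx'
    have hmm : m' = m := by omega
    subst hmm
    have hfalse := hg.2 y hy
    simp only [Bool.and_eq_true, decide_eq_true_eq] at hyt
    simp only [decide_eq_true_eq] at hfalse
    omega

-- the good-index list is strictly increasing
theorem pv_pairwise (j k : Int) (Config : List (List Int)) :
    (((PySem.List.enumerate Config 0).filter (pvGood j k)).map (fun p => p.1)).Pairwise
      (fun a b => a < b) := by
  refine List.pairwise_map.2 (List.Pairwise.filter _ ?_)
  exact PySem.List.pairwise_lt_enumerate Config 0

theorem pv_main (j k : Int) (Config : List (List Int)) :
    gap_subCv2 j k Config = gap_subCv2_alt j k Config := by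
  rw [pv_A_eq]
  unfold gap_subCv2_alt
  simp only
  have hperm : (((PySem.List.enumerate Config 0).filter (pvGood j k)).map
      (fun p => p.1)).Perm (PySem.Set.diff
        (PySem.Set.ofList (((PySem.List.enumerate Config 0).filter
            (fun p => p.2.contains j)).map (fun p => p.1)))
        (PySem.Set.ofList ((PySem.List.enumerate Config 0).flatMap (fun p =>
            (p.2.filter (fun y => decide (j < y) && decide (y < k))).map (fun _ => p.1))))) := by
    refine (List.perm_ext_iff_of_nodup ?_ ?_).2 (fun x => (pv_mem_diff j k Config x).symm)
    · exact (pv_pairwise j k Config).nodup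
    · exact PySem.Set.nodup_diff _ _ (PySem.Set.nodup_ofList _)
  exact (PySem.List.sorted_eq_of_perm_of_pairwise_lt _ _ _ hperm (pv_pairwise j k Config)).symm

-- ===== VERDICT (by name: the statement is the Claim_ definition above) =====
theorem gap_subCv2_spec : Claim_equal_gap_subCv2 := by
  intro j k Config _
  unfold Spec_gap_subCv2
  exact pv_main j k Config
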